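-- pv_equiv track=rewrite | github.com/b1est/sromlabs | func.py | rBinConv
-- ===== SOURCE A (Python) =====
-- Alphabet = "0123456789ABCDEFGHIJKLMNOPQRSTUVWXYZ"
--
-- def conv(num, to = 32, froM = 16):
--     if isinstance(num, str):
--       n = int(num, froM)
--     else:
--       n = int(num)
--     if n < to:
--       return Alphabet[n]
--     else:
--       return conv(n // to, to) + Alphabet[n % to]
--
-- def rBinConv(num, beta):
--    Num = ''
--    if num == []:
--       num.append(0)
--    for i in num:
--       Num = Num + str(i)
--    num = conv(Num, beta, 2)
--    return num
-- ===== SOURCE B (Python) =====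
-- Alphabet = "0123456789ABCDEFGHIJKLMNOPQRSTUVWXYZ"
--
-- def rBinConv(num, beta):
--     if num == []:
--         num.append(0)
--     # accumulate the binary value arithmetically, one digit character at a time,
--     # instead of joining one big string and parsing it in a single int(Num, 2) call
--     n = 0
--     for i in num:
--         for ch in str(i):
--             n = 2 * n + int(ch, 2)
--     if n == 0:
--         return Alphabet[0]
--     out = ''
--     while n:
--         out = Alphabet[n % beta] + out
--         n //= beta
--     return out
-- ===== Notes on version B (the rewrite author's own statement) =====
-- stated objective: alternative
-- what changed: A joins str(i) into one string, parses it with int(Num,2) and converts via a recursive str/int-polymorphic helper that prepends on each call; B never builds or parses a string: it folds n = 2*n + int(ch, 2) over the decimal digits of each element, then peels base-beta digits with an iterative while loop (n % beta, n //= beta) building the output back-to-front.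
-- outside the precondition, e.g. on rBinConv([-1], 16): A returns 'Z', B raises ValueError; on rBinConv([0], 1): A returns '0', B returns '0'; on rBinConv([1, 0], 37): A returns '2', B returns '2'
import Mathlib
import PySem

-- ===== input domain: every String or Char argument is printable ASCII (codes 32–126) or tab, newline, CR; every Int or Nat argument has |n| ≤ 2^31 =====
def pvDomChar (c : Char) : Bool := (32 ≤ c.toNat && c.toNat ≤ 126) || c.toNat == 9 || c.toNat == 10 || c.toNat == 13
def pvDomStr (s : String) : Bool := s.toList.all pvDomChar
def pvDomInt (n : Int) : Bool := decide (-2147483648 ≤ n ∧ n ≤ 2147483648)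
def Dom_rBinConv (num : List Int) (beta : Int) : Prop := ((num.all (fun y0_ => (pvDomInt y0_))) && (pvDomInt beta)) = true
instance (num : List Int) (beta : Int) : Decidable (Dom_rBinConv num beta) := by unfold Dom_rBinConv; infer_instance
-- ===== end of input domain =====

-- B builds the binary value arithmetically (n = 2*n + int(ch) over each element's decimal
-- digits, no string join and no int(Num,2)) and converts to base beta with an iterative
-- digit-peeling loop instead of A's recursive str/int-polymorphic conv helper (objective:
-- alternative). A's in-place append of 0 to an empty argument list (a mutation of the caller's
-- list, performed by B too) is not covered by the return-value equivalence proved here.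

-- ===== PORT A =====
-- Alphabet = "0123456789ABCDEFGHIJKLMNOPQRSTUVWXYZ"  (as a char list; Lean's String is kernel-opaque)
def pvAlphabet : List Char :=
  ['0','1','2','3','4','5','6','7','8','9','A','B','C','D','E','F','G','H','I','J',
   'K','L','M','N','O','P','Q','R','S','T','U','V','W','X','Y','Z']

-- A's for-loop  `for i in num: Num = Num + str(i)`
def pvJoinChars (num : List Int) : List Char :=
  num.foldl (fun acc i => acc ++ PySem.Int.toChars i) []

-- hand port of int(Num, 2): exact on the strings pvJoinChars can produce — '0'/'1' digit runs,
-- optionally with one leading '-' from a negative first element (Python parses '-101' too);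
-- none = ValueError (a '-' in any later position, or a digit other than 0/1)
def pvBinMag? (cs : List Char) : Option Int :=
  if cs ≠ [] ∧ cs.all (fun c => c == '0' || c == '1') = true then
    some (cs.foldl (fun a c => 2 * a + (if c = '1' then 1 else 0)) 0)
  else none

def pvParseBin? (cs : List Char) : Option Int :=
  if cs.head? = some '-' then (pvBinMag? cs.tail).map (fun v => -v)
  else pvBinMag? cs

-- A's conv(n, to) on an int argument; fuel makes the Python recursion total (0 fuel is never
-- reached on Pre_); none = IndexError from Alphabet[..] (or exhausted recursion, outside Pre_)
def pvConvA (fuel : Nat) (n base : Int) : Option (List Char) :=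
  match fuel with
  | 0 => none
  | fuel + 1 =>
    if n < base then
      (PySem.List.pyGet? pvAlphabet n).map (fun c => [c])
    else
      match pvConvA fuel (PySem.Int.floordiv n base) base,
            PySem.List.pyGet? pvAlphabet (PySem.Int.mod n base) with
      | some s, some c => some (s ++ [c])
      | _, _ => none

def rBinConv (num : List Int) (beta : Int) : String :=
  match pvParseBin? (pvJoinChars (if num = [] then [0] else num)) with
  | none => ""                      -- int(Num, 2) raises ValueError (outside Pre_)
  | some n =>
    match pvConvA (n.toNat + 1) n beta with
    | some cs => String.mk cs
    | none => ""                    -- conv raises or diverges (outside Pre_)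

-- ===== PORT B =====
-- the inner step  `n = 2 * n + int(ch, 2)`; none = ValueError from int(ch, 2) on any
-- character other than '0'/'1', e.g. '2' or '-' (never reached on Pre_)
def pvAccDigit (a : Option Int) (c : Char) : Option Int :=
  a.bind (fun n => if c = '0' ∨ c = '1' then some (2 * n + (if c = '1' then 1 else 0)) else none)

-- the nested for-loops  `for i in num: for ch in str(i): n = 2 * n + int(ch, 2)`
def pvBinVal? (num : List Int) : Option Int :=
  num.foldl (fun a i => (PySem.Int.toChars i).foldl pvAccDigit a) (some 0)

-- the while-loop  `while n: out = Alphabet[n % beta] + out; n //= beta`;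
-- fuel makes it total (never exhausted on Pre_; the loop diverges in Python for negative n)
def pvLoopB (fuel : Nat) (n beta : Int) (out : List Char) : Option (List Char) :=
  match fuel with
  | 0 => none
  | fuel + 1 =>
    if n = 0 then some out
    else
      match PySem.List.pyGet? pvAlphabet (PySem.Int.mod n beta) with
      | some c => pvLoopB fuel (PySem.Int.floordiv n beta) beta (c :: out)
      | none => none                -- IndexError (outside Pre_)

def rBinConv_alt (num : List Int) (beta : Int) : String :=
  match pvBinVal? (if num = [] then [0] else num) with
  | none => ""                      -- int(ch) raises ValueError (outside Pre_)
  | some n =>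
    if n = 0 then String.mk ['0']   -- return Alphabet[0]
    else
      match pvLoopB (n.toNat + 1) n beta [] with
      | some cs => String.mk cs
      | none => ""                  -- loop diverges / IndexError (outside Pre_)

-- ===== PRECONDITION & SPEC =====
-- Pre_ excludes (a) lists with an element whose str() is not all '0'/'1' digits: either
-- int(Num,2) raises ValueError, or — when a leading '-' still parses — A returns a letter via
-- Python's negative-index wraparound while B raises ValueError at int('-');
-- and (b) beta outside 2..36: A's recursion diverges (beta <= 1) or hits an IndexError
-- (beta > 36) except on degenerate values where both programs agree (see the claim's cites).
def Pre_rBinConv (num : List Int) (beta : Int) : Prop :=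
  (num.all (fun i => (PySem.Int.toChars i).all (fun c => c == '0' || c == '1'))) = true
    ∧ 2 ≤ beta ∧ beta ≤ 36

instance (num : List Int) (beta : Int) : Decidable (Pre_rBinConv num beta) := by
  unfold Pre_rBinConv; infer_instance

def pvWitness_rBinConv : List Int × Int := ([1, 0, 1], 16)

def Spec_rBinConv (num : List Int) (beta : Int) (out : String) : Prop := out = rBinConv_alt num beta
instance (num : List Int) (beta : Int) (out : String) : Decidable (Spec_rBinConv num beta out) := by unfold Spec_rBinConv; infer_instance

-- ===== CLAIM (what is proved, stated in full; the proofs are below) =====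
def Claim_equal_rBinConv : Prop := ∀ (num : List Int) (beta : Int), Dom_rBinConv num beta → Pre_rBinConv num beta → Spec_rBinConv num beta (rBinConv num beta)

-- ===== LEMMAS AND PROOFS =====

lemma pv_toDigitsCore_cons_ne_nil (b : Nat) :
    ∀ (f n : Nat) (c : Char) (l : List Char), Nat.toDigitsCore b f n (c :: l) ≠ [] := by
  intro f
  induction f with
  | zero => intro n c l; simp [Nat.toDigitsCore]
  | succ f ih =>
    intro n c l
    simp only [Nat.toDigitsCore]
    split
    · simp
    · exact ih _ _ _

lemma pv_toDigits_ne_nil (b n : Nat) : Nat.toDigits b n ≠ [] := by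
  unfold Nat.toDigits
  simp only [Nat.toDigitsCore]
  split
  · simp
  · exact pv_toDigitsCore_cons_ne_nil _ _ _ _ _

lemma pv_toChars_ne_nil (n : Int) : PySem.Int.toChars n ≠ [] := by
  unfold PySem.Int.toChars
  split
  · simp
  · exact pv_toDigits_ne_nil _ _

lemma pv_join01 (num : List Int)
    (h : ∀ i ∈ num, ∀ c ∈ PySem.Int.toChars i, c = '0' ∨ c = '1') :
    ∀ c ∈ pvJoinChars num, c = '0' ∨ c = '1' := by
  intro c hc
  unfold pvJoinChars at hc
  rw [PySem.List.foldl_append_eq_flatMap] at hc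
  simp only [List.nil_append, List.mem_flatMap] at hc
  obtain ⟨i, hi, hci⟩ := hc
  exact h i hi c hci

lemma pv_join_ne_nil (num : List Int) (h : num ≠ []) : pvJoinChars num ≠ [] := by
  unfold pvJoinChars
  rw [PySem.List.foldl_append_eq_flatMap]
  cases num with
  | nil => exact absurd rfl h
  | cons i rest =>
    simp only [List.nil_append, List.flatMap_cons]
    intro hnil
    rcases List.append_eq_nil_iff.mp hnil with ⟨h1, _⟩
    exact pv_toChars_ne_nil i h1

lemma pv_foldl_bin_nonneg (cs : List Char) :
    ∀ a : Int, 0 ≤ a → 0 ≤ cs.foldl (fun a c => 2 * a + (if c = '1' then 1 else 0)) a := by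
  induction cs with
  | nil => intro a ha; simpa using ha
  | cons c rest ih =>
    intro a ha
    simp only [List.foldl_cons]
    exact ih _ (by split_ifs <;> omega)

lemma pv_parse_some (cs : List Char) (h1 : cs ≠ []) (h2 : ∀ c ∈ cs, c = '0' ∨ c = '1') :
    pvParseBin? cs = some (cs.foldl (fun a c => 2 * a + (if c = '1' then 1 else 0)) 0) := by
  unfold pvParseBin?
  rw [if_neg, pvBinMag?, if_pos ⟨h1, by simpa [List.all_eq_true] using h2⟩]
  cases cs with
  | nil => exact absurd rfl h1
  | cons c rest =>
    simp only [List.head?_cons, Option.some.injEq]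
    rcases h2 c List.mem_cons_self with hc | hc <;> subst hc <;> decide

-- B's inner digit fold agrees with A's binary-parse fold on '0'/'1' characters
lemma pv_acc01 (cs : List Char) (h : ∀ c ∈ cs, c = '0' ∨ c = '1') :
    ∀ a : Int, cs.foldl pvAccDigit (some a)
      = some (cs.foldl (fun a c => 2 * a + (if c = '1' then 1 else 0)) a) := by
  induction cs with
  | nil => intro a; simp
  | cons c rest ih =>
    intro a
    have hrest : ∀ c ∈ rest, c = '0' ∨ c = '1' := fun c hc => h c (List.mem_cons_of_mem _ hc)
    rcases h c (List.mem_cons_self) with hc | hc <;> subst hc <;>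
      simp only [List.foldl_cons]
    · have h1 : pvAccDigit (some a) '0' = some (2 * a + (if ('0' : Char) = '1' then 1 else 0)) := by
        unfold pvAccDigit
        simp only [Option.bind_some]
        rw [if_pos (by decide)]
      rw [h1, ih hrest]
    · have h1 : pvAccDigit (some a) '1' = some (2 * a + (if ('1' : Char) = '1' then 1 else 0)) := by
        unfold pvAccDigit
        simp only [Option.bind_some]
        rw [if_pos (by decide)]
      rw [h1, ih hrest]
      norm_num

-- the nested fold over num equals A's single fold over the concatenation of all digit strings
lemma pv_binval (num : List Int)
    (h : ∀ i ∈ num, ∀ c ∈ PySem.Int.toChars i, c = '0' ∨ c = '1') :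
    ∀ a : Int,
      num.foldl (fun a i => (PySem.Int.toChars i).foldl pvAccDigit a) (some a)
        = some ((num.flatMap PySem.Int.toChars).foldl
            (fun a c => 2 * a + (if c = '1' then 1 else 0)) a) := by
  induction num with
  | nil => intro a; simp
  | cons i rest ih =>
    intro a
    have hi := h i (List.mem_cons_self)
    have hrest : ∀ j ∈ rest, ∀ c ∈ PySem.Int.toChars j, c = '0' ∨ c = '1' :=
      fun j hj => h j (List.mem_cons_of_mem _ hj)
    simp only [List.foldl_cons, List.flatMap_cons, List.foldl_append]
    rw [pv_acc01 _ hi, ih hrest]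

lemma pv_alpha_get (k : Int) (h0 : 0 ≤ k) (h36 : k < 36) :
    ∃ c, PySem.List.pyGet? pvAlphabet k = some c := by
  rw [PySem.List.pyGet?_of_nonneg_of_lt pvAlphabet h0 (by simp [pvAlphabet]; omega)]
  refine ⟨pvAlphabet[k.toNat]'(by simp [pvAlphabet]; omega), ?_⟩
  exact List.getElem?_eq_getElem _

lemma pv_conv_loop (f : Nat) : ∀ (n beta : Int) (acc : List Char),
    0 < n → 2 ≤ beta → beta ≤ 36 → n < (f : Int) →
    ∃ s, pvConvA f n beta = some s ∧ pvLoopB f n beta acc = some (s ++ acc) := by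
  induction f with
  | zero =>
    intro n beta acc h0 _ _ hf
    exact absurd hf (by push_cast; omega)
  | succ f ih =>
    intro n beta acc h0 hb2 hb36 hf
    have hbpos : (0 : Int) < beta := by omega
    have hr0 := PySem.Int.mod_nonneg n hbpos
    have hrlt := PySem.Int.mod_lt n hbpos
    obtain ⟨c, hc⟩ := pv_alpha_get (PySem.Int.mod n beta) hr0 (by omega)
    have hfn : n ≤ (f : Int) := by push_cast at hf; omega
    by_cases hnb : n < beta
    · have hmod : PySem.Int.mod n beta = n := by
        rw [PySem.Int.mod_eq_emod_of_pos hbpos]; exact Int.emod_eq_of_lt (le_of_lt h0) hnb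
      have hdiv : PySem.Int.floordiv n beta = 0 := by
        rw [PySem.Int.floordiv_eq_ediv_of_pos hbpos]; exact Int.ediv_eq_zero_of_lt (le_of_lt h0) hnb
      rw [hmod] at hc
      refine ⟨[c], ?_, ?_⟩
      · simp [pvConvA, hnb, hc]
      · obtain ⟨f', rfl⟩ : ∃ f', f = f' + 1 := by
          cases f with
          | zero => exact absurd hfn (by push_cast; omega)
          | succ f' => exact ⟨f', rfl⟩
        simp [pvLoopB, h0.ne', hmod, hc, hdiv]
    · push_neg at hnb
      have hsum := PySem.Int.floordiv_mul_add_mod n beta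
      have hq1 : 1 ≤ PySem.Int.floordiv n beta := by
        by_contra hcon
        push_neg at hcon
        have : PySem.Int.floordiv n beta * beta ≤ 0 * beta :=
          mul_le_mul_of_nonneg_right (by omega) (le_of_lt hbpos)
        simp only [zero_mul] at this
        omega
      have h2q : PySem.Int.floordiv n beta * 2 ≤ PySem.Int.floordiv n beta * beta :=
        mul_le_mul_of_nonneg_left (by omega) (by omega)
      have hqlt : PySem.Int.floordiv n beta < n := by omega
      obtain ⟨s, hcs, hls⟩ := ih (PySem.Int.floordiv n beta) beta (c :: acc) (by omega) hb2 hb36 (by omega)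
      refine ⟨s ++ [c], ?_, ?_⟩
      · simp [pvConvA, not_lt.mpr hnb, hcs, hc]
      · simp [pvLoopB, h0.ne', hc, hls]

-- ===== VERDICT (by name: the statement is the Claim_ definition above) =====
theorem rBinConv_spec : Claim_equal_rBinConv := by
  unfold Claim_equal_rBinConv
  intro num beta _ hpre
  obtain ⟨h01b, hb2, hb36⟩ := hpre
  have h01 : ∀ i ∈ num, ∀ c ∈ PySem.Int.toChars i, c = '0' ∨ c = '1' := by
    simpa [List.all_eq_true] using h01b
  unfold Spec_rBinConv rBinConv rBinConv_alt
  have hne : (if num = [] then ([0] : List Int) else num) ≠ [] := by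
    split_ifs with h
    · simp
    · exact h
  have h01' : ∀ i ∈ (if num = [] then ([0] : List Int) else num),
      ∀ c ∈ PySem.Int.toChars i, c = '0' ∨ c = '1' := by
    split_ifs with h
    · intro i hi
      simp only [List.mem_singleton] at hi
      subst hi
      intro c hc
      have h0 : PySem.Int.toChars 0 = ['0'] := by decide
      rw [h0] at hc
      simp only [List.mem_singleton] at hc
      exact Or.inl hc
    · exact h01
  set num' := (if num = [] then ([0] : List Int) else num) with hnum'
  have hjoin : pvJoinChars num' = num'.flatMap PySem.Int.toChars := by
    unfold pvJoinChars
    rw [PySem.List.foldl_append_eq_flatMap, List.nil_append]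
  set v : Int := (num'.flatMap PySem.Int.toChars).foldl
      (fun a c => 2 * a + (if c = '1' then 1 else 0)) 0 with hv
  have hA : pvParseBin? (pvJoinChars num') = some v := by
    rw [pv_parse_some _ (pv_join_ne_nil _ hne) (pv_join01 _ h01'), hjoin]
  have hB : pvBinVal? num' = some v := by
    unfold pvBinVal?
    exact pv_binval num' h01' 0
  have hv0 : 0 ≤ v := pv_foldl_bin_nonneg _ 0 le_rfl
  rw [hA, hB]
  by_cases hvz : v = 0
  · rw [hvz]
    have hA1 : pvConvA 1 0 beta = some ['0'] := by
      simp only [pvConvA]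
      rw [if_pos (show (0 : Int) < beta by omega)]
      decide
    simp [hA1]
  · have hvpos : 0 < v := by omega
    obtain ⟨s, hca, hlb⟩ := pv_conv_loop (v.toNat + 1) v beta [] hvpos hb2 hb36
      (by push_cast [Int.toNat_of_nonneg hv0]; omega)
    simp [hca, hlb, hvz]
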